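-- pv_equiv track=rewrite | github.com/comanitza/sillyspaceinvaders | gamerunner.py | enemyPositionFromShip
-- ===== SOURCE A (Python) =====
-- def enemyPositionFromShip(spaceshipPosition: (int, int), aliensPosition:[(int, int)]) -> []:
--
--     enemyStraigth = 0
--     enemyRight = 0
--     enemyLeft = 0
--
--     for alienPosition in aliensPosition:
--         if abs(alienPosition[0] - spaceshipPosition[0]) < 10:
--             enemyStraigth = 1
--         elif alienPosition[0] > spaceshipPosition[0]:
--             enemyRight = 1
--         elif alienPosition[0] < spaceshipPosition[0]:
--             enemyLeft = 1
--
--     return [enemyStraigth, enemyRight, enemyLeft]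
-- ===== SOURCE B (Python) =====
-- def enemyPositionFromShip(spaceshipPosition: (int, int), aliensPosition: [(int, int)]) -> []:
--     deltas = [a[0] - spaceshipPosition[0] for a in aliensPosition]
--     straight = 1 if any(-10 < d < 10 for d in deltas) else 0
--     right = 1 if any(d >= 10 for d in deltas) else 0
--     left = 1 if any(d <= -10 for d in deltas) else 0
--     return [straight, right, left]
-- ===== Notes on version B (the rewrite author's own statement) =====
-- stated objective: simpler
-- what changed: Replaces the fused stateful elif loop with three independent any-aggregations over the x-deltas (straight: |d|<10, right: d>=10, left: d<=-10).
import Mathlib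
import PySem

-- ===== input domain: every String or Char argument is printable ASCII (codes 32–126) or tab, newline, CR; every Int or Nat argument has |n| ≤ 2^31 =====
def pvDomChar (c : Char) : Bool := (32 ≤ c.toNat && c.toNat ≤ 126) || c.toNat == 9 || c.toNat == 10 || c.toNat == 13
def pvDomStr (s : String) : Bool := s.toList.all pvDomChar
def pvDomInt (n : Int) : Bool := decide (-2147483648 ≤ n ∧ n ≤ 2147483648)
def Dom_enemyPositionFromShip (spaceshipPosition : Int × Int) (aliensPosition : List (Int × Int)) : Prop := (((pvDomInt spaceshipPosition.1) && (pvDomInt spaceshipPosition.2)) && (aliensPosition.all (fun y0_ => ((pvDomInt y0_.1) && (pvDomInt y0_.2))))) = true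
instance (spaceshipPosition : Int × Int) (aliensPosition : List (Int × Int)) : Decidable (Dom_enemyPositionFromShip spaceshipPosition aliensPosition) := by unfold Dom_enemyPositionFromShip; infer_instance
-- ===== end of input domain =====

-- B replaces A's fused stateful elif loop by three independent any-aggregations over the x-deltas (simpler decomposition).


-- ===== PORT A =====
def enemyPositionFromShip (spaceshipPosition : Int × Int) (aliensPosition : List (Int × Int)) : List Int :=
  let st := aliensPosition.foldl (fun (st : Int × Int × Int) alienPosition =>
    if |alienPosition.1 - spaceshipPosition.1| < 10 then (1, st.2.1, st.2.2)
    else if alienPosition.1 > spaceshipPosition.1 then (st.1, 1, st.2.2)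
    else if alienPosition.1 < spaceshipPosition.1 then (st.1, st.2.1, 1)
    else st) (0, 0, 0)
  [st.1, st.2.1, st.2.2]

-- ===== PORT B =====
def enemyPositionFromShip_alt (spaceshipPosition : Int × Int) (aliensPosition : List (Int × Int)) : List Int :=
  let deltas := aliensPosition.map (fun a => a.1 - spaceshipPosition.1)
  let straight : Int := if deltas.any (fun d => -10 < d && d < 10) then 1 else 0
  let right : Int := if deltas.any (fun d => d ≥ 10) then 1 else 0
  let left : Int := if deltas.any (fun d => d ≤ -10) then 1 else 0
  [straight, right, left]

-- ===== PRECONDITION & SPEC =====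
def Spec_enemyPositionFromShip (spaceshipPosition : Int × Int) (aliensPosition : List (Int × Int)) (out : List Int) : Prop := out = enemyPositionFromShip_alt spaceshipPosition aliensPosition
instance (spaceshipPosition : Int × Int) (aliensPosition : List (Int × Int)) (out : List Int) : Decidable (Spec_enemyPositionFromShip spaceshipPosition aliensPosition out) := by unfold Spec_enemyPositionFromShip; infer_instance

-- ===== CLAIM (what is proved, stated in full; the proofs are below) =====
def Claim_equal_enemyPositionFromShip : Prop := ∀ (spaceshipPosition : Int × Int) (aliensPosition : List (Int × Int)), Dom_enemyPositionFromShip spaceshipPosition aliensPosition → Spec_enemyPositionFromShip spaceshipPosition aliensPosition (enemyPositionFromShip spaceshipPosition aliensPosition)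

-- ===== LEMMAS AND PROOFS =====

-- A's loop only ever assigns 1; its result from any initial state is "1 if some element triggers, else the initial component".
theorem pv_loop_eq (sx : Int) (xs : List (Int × Int)) (s r l : Int) :
    xs.foldl (fun (st : Int × Int × Int) a =>
      if |a.1 - sx| < 10 then (1, st.2.1, st.2.2)
      else if a.1 > sx then (st.1, 1, st.2.2)
      else if a.1 < sx then (st.1, st.2.1, 1)
      else st) (s, r, l)
    = ((if xs.any (fun a => -10 < a.1 - sx && a.1 - sx < 10) then 1 else s),
       (if xs.any (fun a => a.1 - sx ≥ 10) then 1 else r),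
       (if xs.any (fun a => a.1 - sx ≤ -10) then 1 else l)) := by
  induction xs generalizing s r l with
  | nil => simp
  | cons a xs ih =>
    simp only [List.foldl_cons, List.any_cons]
    by_cases h1 : |a.1 - sx| < 10
    · have h1' := abs_lt.mp h1
      have hs : (decide (-10 < a.1 - sx) && decide (a.1 - sx < 10)) = true := by
        simp only [Bool.and_eq_true, decide_eq_true_eq]; omega
      have hr : decide (a.1 - sx ≥ 10) = false := by simp; omega
      have hl : decide (a.1 - sx ≤ -10) = false := by simp; omega
      rw [if_pos h1, ih]
      simp only [hs, hr, hl, Bool.false_or, Bool.true_or]; simp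
    · have h1' : ¬(-10 < a.1 - sx ∧ a.1 - sx < 10) := fun h => h1 (abs_lt.mpr h)
      have hs : (decide (-10 < a.1 - sx) && decide (a.1 - sx < 10)) = false := by
        simp only [Bool.and_eq_false_iff, decide_eq_false_iff_not]; omega
      by_cases h2 : a.1 > sx
      · have hr : decide (a.1 - sx ≥ 10) = true := by simp; omega
        have hl : decide (a.1 - sx ≤ -10) = false := by simp; omega
        rw [if_neg h1, if_pos h2, ih]
        simp only [hs, hr, hl, Bool.false_or, Bool.true_or]; simp
      · by_cases h3 : a.1 < sx
        · have hr : decide (a.1 - sx ≥ 10) = false := by simp; omega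
          have hl : decide (a.1 - sx ≤ -10) = true := by simp; omega
          rw [if_neg h1, if_neg h2, if_pos h3, ih]
          simp only [hs, hr, hl, Bool.false_or, Bool.true_or]; simp
        · exact absurd (abs_lt.mpr ⟨by omega, by omega⟩) h1

-- ===== VERDICT (by name: the statement is the Claim_ definition above) =====
theorem enemyPositionFromShip_spec : Claim_equal_enemyPositionFromShip := by
  intro ship aliens _
  unfold Spec_enemyPositionFromShip enemyPositionFromShip enemyPositionFromShip_alt
  simp only [pv_loop_eq, List.any_map]
  rfl
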